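-- pv_equiv track=rewrite | github.com/Ama-suke/GraphMaker | script/ui_form.py | getNumberedNameIfDuplicated
-- ===== SOURCE A (Python) =====
-- def getNumberedNameIfDuplicated(name: str, nameList: list):
--     if name not in nameList:
--         return name
--     else:
--         index = 1
--         while f"{name}/{index}" in nameList:
--             index += 1
--         return f"{name}/{index}"
-- ===== SOURCE B (Python) =====
-- def getNumberedNameIfDuplicated(name: str, nameList: list):
--     used = set(nameList)
--     if name not in used:
--         return name
--
--     def allTaken(m):
--         # True iff every candidate name/1 .. name/m is already used
--         return all(f"{name}/{i}" in used for i in range(1, m + 1))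
--
--     # the smallest free index lies in [1, len(nameList) + 1] (pigeonhole),
--     # and "not allTaken(m)" is monotone in m, so binary-search for the
--     # smallest m with a free candidate among 1..m; that m is the answer.
--     lo, hi = 1, len(nameList) + 1
--     while lo < hi:
--         mid = (lo + hi) // 2
--         if allTaken(mid):
--             lo = mid + 1
--         else:
--             hi = mid
--     return f"{name}/{lo}"
-- ===== Notes on version B (the rewrite author's own statement) =====
-- stated objective: alternative
-- what changed: B replaces A's linear increment-and-probe loop by a binary search over [1, len(nameList)+1] on the monotone predicate 'all candidates name/1..name/m are already used' (checked against a prebuilt set), which locates the smallest free index without visiting each index in turn.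
import Mathlib
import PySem

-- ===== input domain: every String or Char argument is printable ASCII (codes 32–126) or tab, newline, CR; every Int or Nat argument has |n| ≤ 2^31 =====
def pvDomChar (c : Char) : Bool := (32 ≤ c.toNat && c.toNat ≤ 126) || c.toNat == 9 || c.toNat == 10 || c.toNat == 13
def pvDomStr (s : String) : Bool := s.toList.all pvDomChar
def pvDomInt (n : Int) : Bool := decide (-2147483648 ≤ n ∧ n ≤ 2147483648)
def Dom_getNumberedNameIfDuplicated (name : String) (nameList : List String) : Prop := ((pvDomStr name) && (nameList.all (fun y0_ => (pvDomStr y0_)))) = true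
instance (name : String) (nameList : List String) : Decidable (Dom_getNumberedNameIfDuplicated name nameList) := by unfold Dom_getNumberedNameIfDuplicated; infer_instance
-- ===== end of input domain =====

-- B binary-searches [1, len(nameList)+1] on the monotone predicate "name/1 .. name/m are all
-- used" (over a prebuilt set) for the smallest free index; A probes the whole list once per
-- candidate index. Return values agree everywhere (alternative algorithm, similar cost).

-- ===== PORT A =====
-- A's `while` loop; the fuel `nameList.length + 1` only makes the recursion total:
-- the candidates for index 1 .. length+1 are pairwise distinct strings, so at most
-- `length` of them occur in the list and the loop exits before the fuel runs out.
def pvALoop (name : String) (nameList : List String) : Nat → Int → String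
  | 0, index => name ++ "/" ++ PySem.Int.toStr index
  | fuel + 1, index =>
      if (name ++ "/" ++ PySem.Int.toStr index) ∈ nameList then
        pvALoop name nameList fuel (index + 1)
      else
        name ++ "/" ++ PySem.Int.toStr index

def getNumberedNameIfDuplicated (name : String) (nameList : List String) : String :=
  if name ∉ nameList then name
  else pvALoop name nameList (nameList.length + 1) 1

-- ===== PORT B =====
-- Source B's allTaken(m): all(f"{name}/{i}" in used for i in range(1, m + 1))
def pvAllTaken (name : String) (used : PySem.Set String) (m : Int) : Bool :=
  (PySem.List.pyRange 1 (m + 1)).all (fun i => used.contains (name ++ "/" ++ PySem.Int.toStr i))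

-- Source B's `while lo < hi` binary-search loop; terminates because the bracket shrinks.
def pvBSearch (name : String) (used : PySem.Set String) (lo hi : Int) : String :=
  if h : lo < hi then
    let mid := PySem.Int.floordiv (lo + hi) 2
    if pvAllTaken name used mid then pvBSearch name used (mid + 1) hi
    else pvBSearch name used lo mid
  else name ++ "/" ++ PySem.Int.toStr lo
termination_by (hi - lo).toNat
decreasing_by
  · have := PySem.Int.floordiv_two_mid_bounds (le_of_lt h)
    omega
  · have h1 := PySem.Int.floordiv_two_mid_bounds (le_of_lt h)
    have h2 := (PySem.Int.floordiv_lt_iff_lt_mul (a := lo + hi) (b := 2) (q := hi) (by norm_num)).mpr (by omega)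
    omega

def getNumberedNameIfDuplicated_alt (name : String) (nameList : List String) : String :=
  let used : PySem.Set String := PySem.Set.ofList nameList
  if name ∉ used then name
  else pvBSearch name used 1 (nameList.length + 1)

-- ===== PRECONDITION & SPEC =====
def Spec_getNumberedNameIfDuplicated (name : String) (nameList : List String) (out : String) : Prop := out = getNumberedNameIfDuplicated_alt name nameList
instance (name : String) (nameList : List String) (out : String) : Decidable (Spec_getNumberedNameIfDuplicated name nameList out) := by unfold Spec_getNumberedNameIfDuplicated; infer_instance

-- ===== CLAIM (what is proved, stated in full; the proofs are below) =====
def Claim_equal_getNumberedNameIfDuplicated : Prop := ∀ (name : String) (nameList : List String), Dom_getNumberedNameIfDuplicated name nameList → Spec_getNumberedNameIfDuplicated name nameList (getNumberedNameIfDuplicated name nameList)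

-- ===== LEMMAS AND PROOFS =====

def pvMyDigits (n : Nat) : List Char :=
  if h : n < 10 then [Nat.digitChar n]
  else pvMyDigits (n / 10) ++ [Nat.digitChar (n % 10)]
decreasing_by exact Nat.div_lt_self (by omega) (by norm_num)

lemma pv_toDigitsCore_eq (fuel : Nat) : ∀ (n : Nat) (ds : List Char), n ≤ fuel →
    Nat.toDigitsCore 10 (fuel + 1) n ds = pvMyDigits n ++ ds := by
  induction fuel with
  | zero =>
      intro n ds h
      have hn : n = 0 := by omega
      subst hn
      rw [pvMyDigits]
      simp [Nat.toDigitsCore]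
  | succ f ih =>
      intro n ds h
      rw [show Nat.toDigitsCore 10 (f + 1 + 1) n ds =
            if n / 10 = 0 then Nat.digitChar (n % 10) :: ds
            else Nat.toDigitsCore 10 (f + 1) (n / 10) (Nat.digitChar (n % 10) :: ds) from rfl]
      by_cases h10 : n < 10
      · rw [if_pos (by omega), pvMyDigits]
        simp [h10, Nat.mod_eq_of_lt h10]
      · have hd := Nat.div_lt_self (show 0 < n by omega) (show 1 < 10 by norm_num)
        rw [if_neg (by omega), ih (n / 10) _ (by omega)]
        conv_rhs => rw [pvMyDigits]
        rw [dif_neg h10]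
        simp

lemma pv_toDigits_eq (n : Nat) : Nat.toDigits 10 n = pvMyDigits n := by
  have := pv_toDigitsCore_eq n n [] le_rfl
  simpa [Nat.toDigits] using this

def pvDval (cs : List Char) : Nat := cs.foldl (fun a c => 10 * a + (c.toNat - 48)) 0

lemma pv_digitChar_toNat (d : Nat) (h : d < 10) : (Nat.digitChar d).toNat - 48 = d := by
  interval_cases d <;> decide

lemma pv_dval_myDigits (n : Nat) : pvDval (pvMyDigits n) = n := by
  induction n using Nat.strong_induction_on with
  | _ n ih =>
    rw [pvMyDigits]
    by_cases h : n < 10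
    · rw [dif_pos h]
      simp [pvDval, pv_digitChar_toNat n h]
    · rw [dif_neg h]
      have hd := Nat.div_lt_self (show 0 < n by omega) (show 1 < 10 by norm_num)
      have h1 := ih (n / 10) hd
      have h2 := pv_digitChar_toNat (n % 10) (Nat.mod_lt n (by norm_num))
      simp only [pvDval, List.foldl_append, List.foldl] at h1 ⊢
      rw [h1, h2]
      omega

lemma pv_cand_inj (name : String) (i j : Int) (hi : 1 ≤ i) (hj : 1 ≤ j)
    (h : name ++ "/" ++ PySem.Int.toStr i = name ++ "/" ++ PySem.Int.toStr j) : i = j := by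
  have h' : (name ++ "/" ++ PySem.Int.toStr i).toList = (name ++ "/" ++ PySem.Int.toStr j).toList := by
    rw [h]
  simp only [String.toList_append, PySem.Int.toList_toStr, List.append_cancel_left_eq] at h'
  unfold PySem.Int.toChars at h'
  rw [if_neg (by omega), if_neg (by omega), pv_toDigits_eq, pv_toDigits_eq] at h'
  have := congrArg pvDval h'
  rw [pv_dval_myDigits, pv_dval_myDigits] at this
  omega

lemma pv_exists_free (name : String) (nameList : List String) :
    ∃ k : Nat, k ≤ nameList.length ∧
      (name ++ "/" ++ PySem.Int.toStr ((k : Int) + 1)) ∉ nameList := by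
  by_contra hall
  push_neg at hall
  have hnd : ((List.range' 1 (nameList.length + 1)).map
      (fun k : Nat => name ++ "/" ++ PySem.Int.toStr (k : Int))).Nodup := by
    refine (List.nodup_range').map_on ?_
    · intro x hx y hy hxy
      rw [List.mem_range'] at hx hy
      obtain ⟨a, ha, rfl⟩ := hx
      obtain ⟨b, hb, rfl⟩ := hy
      have := pv_cand_inj name _ _ (by omega) (by omega) hxy
      omega
  have hsub : ((List.range' 1 (nameList.length + 1)).map
      (fun k : Nat => name ++ "/" ++ PySem.Int.toStr (k : Int))) ⊆ nameList := by
    intro s hs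
    rw [List.mem_map] at hs
    obtain ⟨k, hk, rfl⟩ := hs
    rw [List.mem_range'] at hk
    obtain ⟨a, ha, rfl⟩ := hk
    have := hall a (by omega)
    simpa [show ((a : Int) + 1) = ((1 + 1 * a : Nat) : Int) by push_cast; ring] using this
  have hlen := (List.subperm_of_subset hnd hsub).length_le
  simp at hlen

lemma pv_aloop_spec (name : String) (L : List String) (m : Int)
    (hm : (name ++ "/" ++ PySem.Int.toStr m) ∉ L)
    (hmin : ∀ j : Int, 1 ≤ j → j < m → (name ++ "/" ++ PySem.Int.toStr j) ∈ L) :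
    ∀ (fuel : Nat) (i : Int), 1 ≤ i → i ≤ m → (m - i).toNat < fuel →
      pvALoop name L fuel i = name ++ "/" ++ PySem.Int.toStr m := by
  intro fuel
  induction fuel with
  | zero => intro i h1 h2 h3; omega
  | succ f ih =>
      intro i h1 h2 h3
      rw [pvALoop]
      by_cases hc : (name ++ "/" ++ PySem.Int.toStr i) ∈ L
      · have hne : i ≠ m := by rintro rfl; exact hm hc
        rw [if_pos hc]
        exact ih (i + 1) (by omega) (by omega) (by omega)
      · have : i = m := by
          by_contra hne
          exact hc (hmin i h1 (by omega))
        rw [if_neg hc, this]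

lemma pv_allTaken_iff (name : String) (used : PySem.Set String) (m : Int) :
    pvAllTaken name used m = true ↔
      ∀ i : Int, 1 ≤ i → i ≤ m → used.contains (name ++ "/" ++ PySem.Int.toStr i) = true := by
  unfold pvAllTaken
  rw [List.all_eq_true]
  constructor
  · intro h i h1 h2
    exact h i (PySem.List.mem_pyRange_one.mpr ⟨h1, by omega⟩)
  · intro h i hi
    obtain ⟨h1, h2⟩ := PySem.List.mem_pyRange_one.mp hi
    exact h i h1 (by omega)

lemma pv_bsearch_spec (name : String) (used : PySem.Set String) (m : Int)
    (hm : ¬ used.contains (name ++ "/" ++ PySem.Int.toStr m) = true)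
    (hmin : ∀ j : Int, 1 ≤ j → j < m → used.contains (name ++ "/" ++ PySem.Int.toStr j) = true) :
    ∀ (k : Nat) (lo hi : Int), (hi - lo).toNat ≤ k → 1 ≤ lo → lo ≤ m → m ≤ hi →
      pvBSearch name used lo hi = name ++ "/" ++ PySem.Int.toStr m := by
  intro k
  induction k with
  | zero =>
      intro lo hi hk h1 h2 h3
      have heq : lo = m := by omega
      rw [pvBSearch, dif_neg (by omega), heq]
  | succ k ih =>
      intro lo hi hk h1 h2 h3
      rw [pvBSearch]
      by_cases hlh : lo < hi
      · rw [dif_pos hlh]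
        have hb := PySem.Int.floordiv_two_mid_bounds (le_of_lt hlh)
        have hlt := (PySem.Int.floordiv_lt_iff_lt_mul (a := lo + hi) (b := 2) (q := hi) (by norm_num)).mpr (by omega)
        set mid := PySem.Int.floordiv (lo + hi) 2 with hmid
        by_cases ht : pvAllTaken name used mid = true
        · rw [if_pos ht]
          have hmm : mid < m := by
            by_contra hmm
            exact hm ((pv_allTaken_iff name used mid).mp ht m (by omega) (by omega))
          exact ih (mid + 1) hi (by omega) (by omega) (by omega) h3
        · rw [if_neg ht]
          have hmm : m ≤ mid := by
            by_contra hmm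
            exact ht ((pv_allTaken_iff name used mid).mpr (fun i hi1 hi2 => hmin i hi1 (by omega)))
          exact ih lo mid (by omega) h1 h2 hmm
      · have heq : lo = m := by omega
        rw [dif_neg hlh, heq]

-- ===== VERDICT (by name: the statement is the Claim_ definition above) =====
theorem getNumberedNameIfDuplicated_spec : Claim_equal_getNumberedNameIfDuplicated := by
  intro name nameList _
  unfold Spec_getNumberedNameIfDuplicated getNumberedNameIfDuplicated getNumberedNameIfDuplicated_alt
  by_cases hmem : name ∈ nameList
  · have hmem' : name ∈ PySem.Set.ofList nameList := (PySem.Set.mem_ofList _ _).mpr hmem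
    simp only [hmem, hmem', not_true_eq_false, if_false]
    obtain ⟨k0, hk0, hfree⟩ := pv_exists_free name nameList
    have hex : ∃ k : Nat, (name ++ "/" ++ PySem.Int.toStr ((k : Int) + 1)) ∉ nameList := ⟨k0, hfree⟩
    set m : Int := (Nat.find hex : Int) + 1 with hm_def
    have hm_not : (name ++ "/" ++ PySem.Int.toStr m) ∉ nameList := Nat.find_spec hex
    have hm_le : m ≤ (nameList.length : Int) + 1 := by
      have := Nat.find_min' hex hfree
      omega
    have hmin : ∀ j : Int, 1 ≤ j → j < m → (name ++ "/" ++ PySem.Int.toStr j) ∈ nameList := by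
      intro j h1 h2
      have hjk : (j - 1).toNat < Nat.find hex := by omega
      have hmin' := Nat.find_min hex hjk
      have hcast : (((j - 1).toNat : Int) + 1) = j := by omega
      rw [hcast] at hmin'
      simpa using hmin'
    have hmin_used : ∀ j : Int, 1 ≤ j → j < m →
        (PySem.Set.ofList nameList).contains (name ++ "/" ++ PySem.Int.toStr j) = true := by
      intro j h1 h2
      simpa [PySem.Set.contains, List.contains_iff_mem, PySem.Set.mem_ofList] using hmin j h1 h2
    have hm_used : ¬ (PySem.Set.ofList nameList).contains (name ++ "/" ++ PySem.Int.toStr m) = true := by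
      simpa [PySem.Set.contains, List.contains_iff_mem, PySem.Set.mem_ofList] using hm_not
    rw [pv_aloop_spec name nameList m hm_not hmin (nameList.length + 1) 1 (by omega) (by omega) (by omega)]
    rw [pv_bsearch_spec name _ m hm_used hmin_used (nameList.length + 1) 1 ((nameList.length : Int) + 1) (by omega) (by omega) (by omega) hm_le]
  · have hmem' : name ∉ PySem.Set.ofList nameList := fun h => hmem ((PySem.Set.mem_ofList _ _).mp h)
    simp [hmem, hmem']
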